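-- pv_equiv track=rewrite | github.com/hbibel/MAMC | ltlparser.py | _find_outer
-- ===== SOURCE A (Python) =====
-- def _find_outer(tokens, token_list):
--     """
--     This function finds the first occurrence of a token from tokens in
--     token_list that is not within parentheses. It returns the partition of
--     token_list by this occurrence, meaning that
--     result[0] + [token] + result[1] == token_list.
--     If there is no such occurrence it returns token_list, None.
--
--     >>> _find_outer('|', ['a', '&', '(', 'b', '|', 'c', ')'])
--     (['a', '&', '(', 'b', '|', 'c', ')'], None, None)
--
--     >>> _find_outer('&', ['a', '&', '(', 'b', '|', 'c', ')'])
--     (['a'], ['(', 'b', '|', 'c', ')'], '&')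
--     """
--     depth = 0
--     for i in range(len(token_list) - 1):
--         if depth == 0 and token_list[i] in tokens:
--             return (token_list[:i], token_list[i+1:], token_list[i])
--         if token_list[i] == '(':
--             depth += 1
--         if token_list[i] == ')':
--             depth -= 1
--     return token_list, None, None
-- ===== SOURCE B (Python) =====
-- def _find_outer(tokens, token_list):
--     # Two-pass decomposition: first build a table of pre-token nesting depths,
--     # then search for the first top-level occurrence.
--     depths = []
--     d = 0
--     for t in token_list:
--         depths.append(d)
--         d += (t == '(') - (t == ')')
--     for i in range(len(token_list) - 1):
--         if depths[i] == 0 and token_list[i] in tokens: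
--             return (token_list[:i], token_list[i+1:], token_list[i])
--     return token_list, None, None
-- ===== Notes on version B (the rewrite author's own statement) =====
-- stated objective: alternative
-- what changed: A's single scan carrying a running depth counter is replaced by two passes: first build a table of pre-token nesting depths, then a stateless search over indices for the first top-level match.
import Mathlib
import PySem

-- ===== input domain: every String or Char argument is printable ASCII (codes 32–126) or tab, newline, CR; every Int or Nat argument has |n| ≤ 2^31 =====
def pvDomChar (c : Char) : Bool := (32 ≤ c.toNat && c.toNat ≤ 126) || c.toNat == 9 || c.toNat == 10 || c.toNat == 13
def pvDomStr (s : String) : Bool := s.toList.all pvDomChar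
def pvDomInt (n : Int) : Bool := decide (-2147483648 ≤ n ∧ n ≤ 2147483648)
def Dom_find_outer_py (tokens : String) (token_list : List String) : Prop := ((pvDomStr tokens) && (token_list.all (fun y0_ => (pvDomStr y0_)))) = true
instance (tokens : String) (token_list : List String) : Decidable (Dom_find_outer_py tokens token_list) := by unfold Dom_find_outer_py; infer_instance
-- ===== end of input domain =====

-- B replaces A's single stateful scan by a two-pass decomposition (depth table, then a
-- stateless search); same cost, equivalent on all inputs (objective: alternative).

-- ===== PORT A =====
-- A's loop: index i over range(len-1), carrying the running depth; branches in source order.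
-- token_list[:i] / token_list[i+1:] are exact as take/drop here since 0 ≤ i < len.
def find_outer_py_go (tokens : String) (tl : List String) (depth : Int) (i : Nat) :
    List String × Option (List String) × Option String :=
  if h : i < tl.length - 1 then
    let t := tl[i]'(by omega)
    if depth = 0 && PySem.Str.isIn t tokens then
      (tl.take i, some (tl.drop (i + 1)), some t)
    else
      let d1 := if t = "(" then depth + 1 else depth
      let d2 := if t = ")" then d1 - 1 else d1
      find_outer_py_go tokens tl d2 (i + 1)
  else (tl, none, none)
termination_by tl.length - 1 - i

def find_outer_py (tokens : String) (token_list : List String) : List String × Option (List String) × Option String :=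
  find_outer_py_go tokens token_list 0 0

-- ===== PORT B =====
-- pass 1 of Source B: the list of pre-token nesting depths
def pvDepthTable : List String → Int → List Int
  | [], _ => []
  | t :: ts, d =>
    d :: pvDepthTable ts (d + ((if t = "(" then 1 else 0) - (if t = ")" then 1 else 0)))

-- pass 2 of Source B: stateless search over indices; depths[i] / token_list[i] are in range here.
def find_outer_py_alt_go (tokens : String) (tl : List String) (depths : List Int) (i : Nat) :
    List String × Option (List String) × Option String :=
  if h : i < tl.length - 1 then
    if depths.getD i 0 = 0 && PySem.Str.isIn (tl[i]'(by omega)) tokens then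
      (tl.take i, some (tl.drop (i + 1)), some (tl[i]'(by omega)))
    else find_outer_py_alt_go tokens tl depths (i + 1)
  else (tl, none, none)
termination_by tl.length - 1 - i

def find_outer_py_alt (tokens : String) (token_list : List String) : List String × Option (List String) × Option String :=
  find_outer_py_alt_go tokens token_list (pvDepthTable token_list 0) 0

-- ===== PRECONDITION & SPEC =====
def Spec_find_outer_py (tokens : String) (token_list : List String) (out : List String × Option (List String) × Option String) : Prop := out = find_outer_py_alt tokens token_list
instance (tokens : String) (token_list : List String) (out : List String × Option (List String) × Option String) : Decidable (Spec_find_outer_py tokens token_list out) := by unfold Spec_find_outer_py; infer_instance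

-- ===== CLAIM (what is proved, stated in full; the proofs are below) =====
def Claim_equal_find_outer_py : Prop := ∀ (tokens : String) (token_list : List String), Dom_find_outer_py tokens token_list → Spec_find_outer_py tokens token_list (find_outer_py tokens token_list)

-- ===== LEMMAS AND PROOFS =====

-- the i-th table entry, for i < len, is the start depth plus the net depth of the first i tokens;
-- stated as: entry 0 is d, and entry (i+1) is entry i plus the i-th token's delta.
theorem pvDepthTable_getD_zero (ts : List String) (d : Int) (hts : ts ≠ []) :
    (pvDepthTable ts d).getD 0 0 = d := by
  cases ts with
  | nil => exact absurd rfl hts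
  | cons t ts => simp [pvDepthTable]

theorem pvDepthTable_getD_succ (ts : List String) (d : Int) (i : Nat) (h : i + 1 < ts.length) :
    (pvDepthTable ts d).getD (i + 1) 0 =
      (pvDepthTable ts d).getD i 0 +
        ((if ts.getD i "" = "(" then 1 else 0) - (if ts.getD i "" = ")" then 1 else 0)) := by
  induction ts generalizing d i with
  | nil => simp at h
  | cons t ts ih =>
    cases i with
    | zero =>
      have hts : ts ≠ [] := by
        intro hnil; subst hnil; simp at h
      simpa [pvDepthTable, List.getD] using
        pvDepthTable_getD_zero ts (d + ((if t = "(" then 1 else 0) - (if t = ")" then 1 else 0))) hts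
    | succ j =>
      have := ih (d + ((if t = "(" then 1 else 0) - (if t = ")" then 1 else 0))) j (by simpa using h)
      simpa [pvDepthTable] using this

-- the two loops agree whenever the table entry at i equals A's running depth
theorem go_agree (tokens : String) (tl : List String) :
    ∀ k i depth, tl.length - 1 - i ≤ k →
      (pvDepthTable tl 0).getD i 0 = depth →
      find_outer_py_alt_go tokens tl (pvDepthTable tl 0) i = find_outer_py_go tokens tl depth i := by
  intro k
  induction k with
  | zero =>
    intro i depth hk _
    rw [find_outer_py_alt_go, find_outer_py_go]
    have : ¬ i < tl.length - 1 := by omega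
    simp [this]
  | succ k ih =>
    intro i depth hk hd
    rw [find_outer_py_alt_go, find_outer_py_go]
    by_cases h : i < tl.length - 1
    · simp only [dif_pos h, hd]
      split
      · rfl
      · apply ih _ _ (by omega)
        have hstep := pvDepthTable_getD_succ tl 0 i (by omega)
        have hget : tl.getD i "" = tl[i]'(by omega) := by
          simp [List.getD, List.getElem?_eq_getElem (by omega : i < tl.length)]
        rw [hstep, hget, hd]
        split_ifs <;> omega
    · simp [h]

-- ===== VERDICT (by name: the statement is the Claim_ definition above) =====
theorem find_outer_py_spec : Claim_equal_find_outer_py := by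
  intro tokens token_list _
  unfold Spec_find_outer_py find_outer_py find_outer_py_alt
  exact (go_agree tokens token_list (token_list.length - 1) 0 0 (by omega)
    (by cases token_list <;> simp [pvDepthTable])).symm
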